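-- pv_equiv track=rewrite | github.com/Healingl/APRNet | lib/dataloader/medical_loader_utils.py | get_order_value_list
-- ===== SOURCE A (Python) =====
-- def get_order_value_list(start_idx,input_volume_axis, crop_shape_axi, extraction_step_axi):
--     start_idx_list = [start_idx]
--     while start_idx < input_volume_axis - crop_shape_axi:
--         start_idx += extraction_step_axi
--         if start_idx > input_volume_axis - crop_shape_axi:
--             start_idx = input_volume_axis - crop_shape_axi
--             start_idx_list.append(start_idx)
--             break
--         start_idx_list.append(start_idx)
--     return start_idx_list
-- ===== SOURCE B (Python) =====
-- def get_order_value_list(start_idx, input_volume_axis, crop_shape_axi, extraction_step_axi):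
--     limit = input_volume_axis - crop_shape_axi
--     if start_idx >= limit:
--         return [start_idx]
--     return list(range(start_idx, limit, extraction_step_axi)) + [limit]
-- ===== Notes on version B (the rewrite author's own statement) =====
-- stated objective: simpler
-- what changed: Replaces the incremental while-loop with its in-loop clamp-and-break by a closed form: the interior stride starts come from range(start_idx, limit, step) and the clamped endpoint limit is appended once.
import Mathlib
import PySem

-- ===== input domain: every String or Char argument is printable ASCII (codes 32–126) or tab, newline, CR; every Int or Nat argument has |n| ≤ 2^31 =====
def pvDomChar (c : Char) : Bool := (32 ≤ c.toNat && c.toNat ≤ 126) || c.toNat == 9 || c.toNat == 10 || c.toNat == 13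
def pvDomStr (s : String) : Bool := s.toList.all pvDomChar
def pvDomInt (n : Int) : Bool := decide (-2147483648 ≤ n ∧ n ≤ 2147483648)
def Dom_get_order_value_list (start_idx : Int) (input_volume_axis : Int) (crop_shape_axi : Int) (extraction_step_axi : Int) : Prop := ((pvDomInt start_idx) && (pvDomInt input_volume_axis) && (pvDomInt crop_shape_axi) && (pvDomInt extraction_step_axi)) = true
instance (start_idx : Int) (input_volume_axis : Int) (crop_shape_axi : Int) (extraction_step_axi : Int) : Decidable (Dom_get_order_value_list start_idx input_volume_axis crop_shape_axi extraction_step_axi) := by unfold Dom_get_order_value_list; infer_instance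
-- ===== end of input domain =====

-- B replaces A's incremental while-loop (with in-loop clamp-and-break) by range(start, limit, step) ++ [limit]; objective: simpler.

-- ===== PORT A =====
-- the while-loop of A, with fuel that merely makes the recursion total (sufficient on Pre_)
def pvGoA : Nat → Int → Int → Int → List Int → List Int
  | 0, _, _, _, acc => acc
  | fuel+1, start_idx, limit, step, acc =>
    if start_idx < limit then
      let s := start_idx + step
      if s > limit then acc ++ [limit]
      else pvGoA fuel s limit step (acc ++ [s])
    else acc

def get_order_value_list (start_idx : Int) (input_volume_axis : Int) (crop_shape_axi : Int) (extraction_step_axi : Int) : List Int :=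
  pvGoA ((input_volume_axis - crop_shape_axi - start_idx).toNat + 1) start_idx
    (input_volume_axis - crop_shape_axi) extraction_step_axi [start_idx]

-- ===== PORT B =====
def get_order_value_list_alt (start_idx : Int) (input_volume_axis : Int) (crop_shape_axi : Int) (extraction_step_axi : Int) : List Int :=
  let limit := input_volume_axis - crop_shape_axi
  if start_idx ≥ limit then [start_idx]
  else PySem.List.pyRange start_idx limit extraction_step_axi ++ [limit]

-- ===== PRECONDITION & SPEC =====
-- Pre_ excludes only step ≤ 0 with start_idx below the limit, where A's while-loop never terminates.
def Pre_get_order_value_list (start_idx : Int) (input_volume_axis : Int) (crop_shape_axi : Int) (extraction_step_axi : Int) : Prop :=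
  start_idx ≥ input_volume_axis - crop_shape_axi ∨ 0 < extraction_step_axi
instance (start_idx : Int) (input_volume_axis : Int) (crop_shape_axi : Int) (extraction_step_axi : Int) : Decidable (Pre_get_order_value_list start_idx input_volume_axis crop_shape_axi extraction_step_axi) := by unfold Pre_get_order_value_list; infer_instance

def pvWitness_get_order_value_list : Int × Int × Int × Int := (0, 10, 2, 3)

def Spec_get_order_value_list (start_idx : Int) (input_volume_axis : Int) (crop_shape_axi : Int) (extraction_step_axi : Int) (out : List Int) : Prop := out = get_order_value_list_alt start_idx input_volume_axis crop_shape_axi extraction_step_axi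
instance (start_idx : Int) (input_volume_axis : Int) (crop_shape_axi : Int) (extraction_step_axi : Int) (out : List Int) : Decidable (Spec_get_order_value_list start_idx input_volume_axis crop_shape_axi extraction_step_axi out) := by unfold Spec_get_order_value_list; infer_instance

-- ===== CLAIM (what is proved, stated in full; the proofs are below) =====
def Claim_equal_get_order_value_list : Prop := ∀ (start_idx : Int) (input_volume_axis : Int) (crop_shape_axi : Int) (extraction_step_axi : Int), Dom_get_order_value_list start_idx input_volume_axis crop_shape_axi extraction_step_axi → Pre_get_order_value_list start_idx input_volume_axis crop_shape_axi extraction_step_axi → Spec_get_order_value_list start_idx input_volume_axis crop_shape_axi extraction_step_axi (get_order_value_list start_idx input_volume_axis crop_shape_axi extraction_step_axi)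

-- ===== LEMMAS AND PROOFS =====

lemma pyRange_nil_of_pos (a b s : Int) (hs : 0 < s) (hab : b ≤ a) :
    PySem.List.pyRange a b s = [] := by
  rw [PySem.List.pyRange_of_pos _ _ hs, if_neg (not_lt.mpr hab)]
  simp

lemma pyRange_cons_of_pos (a b s : Int) (hs : 0 < s) (hab : a < b) :
    PySem.List.pyRange a b s = a :: PySem.List.pyRange (a + s) b s := by
  rw [PySem.List.pyRange_of_pos _ _ hs, PySem.List.pyRange_of_pos _ _ hs, if_pos hab]
  have hd0 : (0:Int) ≤ b - a - 1 := by omega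
  have hq0 : (0:Int) ≤ (b - a - 1) / s := Int.ediv_nonneg hd0 hs.le
  have hcount : ((b - a + s - 1) / s).toNat
      = (if a + s < b then ((b - (a + s) + s - 1) / s).toNat else 0) + 1 := by
    have h1 : (b - a + s - 1) / s = (b - a - 1) / s + 1 := by
      have := Int.add_mul_ediv_right (b - a - 1) 1 (ne_of_gt hs)
      have he : b - a + s - 1 = b - a - 1 + 1 * s := by ring
      rw [he, this]
    split_ifs with h
    · have he : b - (a + s) + s - 1 = b - a - 1 := by ring
      rw [h1, he]
      omega
    · have hz : (b - a - 1) / s = 0 := Int.ediv_eq_zero_of_lt hd0 (by omega)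
      rw [h1, hz]
      omega
  rw [hcount, List.range_succ_eq_map, List.map_cons, List.map_map]
  congr 1
  · simp
  · apply List.map_congr_left
    intro k _
    simp only [Function.comp]
    push_cast
    ring

lemma pvGoA_stop (fuel : Nat) (x limit step : Int) (acc : List Int) (h : ¬ x < limit) :
    pvGoA fuel x limit step acc = acc := by
  cases fuel with
  | zero => rfl
  | succ n => simp [pvGoA, h]

lemma pvGoA_eq (limit step : Int) (hs : 0 < step) :
    ∀ (fuel : Nat) (start : Int) (acc : List Int),
      (limit - start).toNat < fuel → start < limit →
      pvGoA fuel start limit step acc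
        = acc ++ PySem.List.pyRange (start + step) limit step ++ [limit] := by
  intro fuel
  induction fuel with
  | zero => intro start acc h _; omega
  | succ n ih =>
    intro start acc hfuel hlt
    rw [pvGoA, if_pos hlt]
    by_cases hover : start + step > limit
    · rw [if_pos hover, pyRange_nil_of_pos _ _ _ hs (by omega)]
      simp
    · rw [if_neg hover]
      by_cases heq : start + step = limit
      · rw [pvGoA_stop n _ _ _ _ (by omega),
          pyRange_nil_of_pos _ _ _ hs (by omega), heq]
        simp
      · have hlt2 : start + step < limit := by omega
        rw [ih (start + step) (acc ++ [start + step]) (by omega) hlt2,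
          pyRange_cons_of_pos _ _ _ hs hlt2]
        simp

-- ===== VERDICT (by name: the statement is the Claim_ definition above) =====
theorem get_order_value_list_spec : Claim_equal_get_order_value_list := by
  intro start_idx iva csa step _ hpre
  unfold Spec_get_order_value_list get_order_value_list get_order_value_list_alt
  by_cases hge : start_idx ≥ iva - csa
  · rw [if_pos hge, pvGoA_stop _ _ _ _ _ (not_lt.mpr hge)]
  · have hlt : start_idx < iva - csa := not_le.mp hge
    have hs : 0 < step := hpre.resolve_left hge
    rw [if_neg hge, pvGoA_eq _ _ hs _ _ _ (by omega) hlt,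
      pyRange_cons_of_pos _ _ _ hs hlt]
    simp
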